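-- pv_equiv track=rewrite | github.com/ericxyzhu/1st-year-1st-semester | Orbit-N.py | obtem_linhas_diagonais
-- ===== SOURCE A (Python) =====
-- def cria_posicao(col, lin):
--     '''
--     Descrição: criar uma posição
--
--     Input:
--     col (um string com uma letra)
--     lin (um inteiro positivo)
--
--     Output:
--     uma posição
--     '''
--     if type(col) == str and len(col) == 1 and 97<=ord(col)<=106 and type(lin) == int and 1 <= lin <= 10:
--         return (col, lin)
--     #para verificar se o col é uma letra válida e lin é um inteiro válido
--     raise ValueError('cria_posicao: argumentos invalidos')
--
-- def obtem_pos_col(p):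
--     '''
--     Descrição: obter a posição da coluna da posição
--
--     Input:
--     p (uma posição)
--
--     Output:
--     um string com uma letra que corresponde a uma coluna
--     '''
--     return p[0]
--
-- def obtem_pos_lin(p):
--     '''
--     Descrição: obter a posição da linha da posição
--
--     Input:
--     p (uma posição)
--
--     Output:
--     um string com uma letra que corresponde a uma linha
--     '''
--     return p[1]
--
-- def obtem_pedra(t, p):
--     '''
--     Descrição: obter a pedra da posição escolhida
--
--     Input:
--     t (um tabuleiro)
--     p (uma posição)
--
--     Output:
--     uma pedra
--     '''
--     return t[obtem_pos_lin(p)-1][ord(obtem_pos_col(p))-97]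
--
-- def obtem_linhas_diagonais(t, p):
--     '''
--     Descrição: obter as posições e pedras das diagonais da posição escolhida
--
--     Input:
--     t (um tabuleiro)
--     p (um posição)
--
--     Output:
--     dois tuplos com as posições e pedras das diagonais da posição escolhida
--     '''
--     tup_diag = ((p, obtem_pedra(t, p)),)
--     tup_antidiag = ((p, obtem_pedra(t, p)),)
--
--     #def chave(x):
--         #return x[0][0]
--
--     pos_agora = p
--     while obtem_pos_col(pos_agora) != 'a' and obtem_pos_lin(pos_agora) != 1:
--         pos_agora = cria_posicao(chr(ord(obtem_pos_col(pos_agora))-1), obtem_pos_lin(pos_agora)-1)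
--         tup_diag = ((pos_agora, obtem_pedra(t, pos_agora)),) + tup_diag
--         #primeiro coletar as posições de cima-esquerda
--     pos_agora = p
--     while obtem_pos_col(pos_agora) != chr(96+len(t)) and obtem_pos_lin(pos_agora) != len(t):
--         pos_agora = cria_posicao(chr(ord(obtem_pos_col(pos_agora))+1), obtem_pos_lin(pos_agora)+1)
--         tup_diag += ((pos_agora, obtem_pedra(t, pos_agora)),)
--         #depois coletar as posições de baixo-direita
--     #tup_diag = tuple(sorted(tup_diag, key = chave)) #ordenar as posições
--
--     pos_agora = p
--     while obtem_pos_col(pos_agora) != 'a' and obtem_pos_lin(pos_agora) != len(t):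
--         pos_agora = cria_posicao(chr(ord(obtem_pos_col(pos_agora))-1), obtem_pos_lin(pos_agora)+1)
--         tup_antidiag = ((pos_agora, obtem_pedra(t, pos_agora)),) + tup_antidiag
--         #primeiro coletar as posições de baixo-esquerda
--     pos_agora = p
--     while obtem_pos_col(pos_agora) != chr(96+len(t)) and obtem_pos_lin(pos_agora) != 1:
--         pos_agora = cria_posicao(chr(ord(obtem_pos_col(pos_agora))+1), obtem_pos_lin(pos_agora)-1)
--         tup_antidiag += ((pos_agora, obtem_pedra(t, pos_agora)),)
--         #depois coletar as posições de cima-direita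
--
--     #tup_antidiag = tuple(sorted(tup_antidiag, key = chave)) #ordenar as posições
--
--     return tup_diag, tup_antidiag
-- ===== SOURCE B (Python) =====
-- def cria_posicao(col, lin):
--     if type(col) == str and len(col) == 1 and 97 <= ord(col) <= 106 and type(lin) == int and 1 <= lin <= 10:
--         return (col, lin)
--     raise ValueError('cria_posicao: argumentos invalidos')
--
-- def obtem_linhas_diagonais(t, p):
--     col, lin = p
--     cria_posicao(col, lin)  # validate the position the way the module itself does
--     n = len(t)
--     c = ord(col)
--     # diagonal: extents toward up-left and down-right, then one fill pass
--     up = min(c - 97, lin - 1)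
--     down = min(96 + n - c, n - lin)
--     diag = tuple(((chr(c + k), lin + k), t[lin + k - 1][c + k - 97])
--                  for k in range(-up, down + 1))
--     # anti-diagonal: extents toward down-left and up-right
--     a = min(c - 97, n - lin)
--     b = min(96 + n - c, lin - 1)
--     antidiag = tuple(((chr(c + k), lin - k), t[lin - k - 1][c + k - 97])
--                      for k in range(-a, b + 1))
--     return diag, antidiag
-- ===== Notes on version B (the rewrite author's own statement) =====
-- stated objective: simpler
-- what changed: B replaces A's four directional while-loops (with tuple prepend/append and a mutable cursor) by validating the position once via cria_posicao, computing each diagonal's two extents as a min of boundary distances, and filling the whole diagonal in a single offset-indexed pass per diagonal.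
-- outside the precondition, e.g. on obtem_linhas_diagonais([[7]], ('a', 0)): A returns (((('a', 0), 7),), ((('a', 0), 7),)), B raises ValueError
import Mathlib
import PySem

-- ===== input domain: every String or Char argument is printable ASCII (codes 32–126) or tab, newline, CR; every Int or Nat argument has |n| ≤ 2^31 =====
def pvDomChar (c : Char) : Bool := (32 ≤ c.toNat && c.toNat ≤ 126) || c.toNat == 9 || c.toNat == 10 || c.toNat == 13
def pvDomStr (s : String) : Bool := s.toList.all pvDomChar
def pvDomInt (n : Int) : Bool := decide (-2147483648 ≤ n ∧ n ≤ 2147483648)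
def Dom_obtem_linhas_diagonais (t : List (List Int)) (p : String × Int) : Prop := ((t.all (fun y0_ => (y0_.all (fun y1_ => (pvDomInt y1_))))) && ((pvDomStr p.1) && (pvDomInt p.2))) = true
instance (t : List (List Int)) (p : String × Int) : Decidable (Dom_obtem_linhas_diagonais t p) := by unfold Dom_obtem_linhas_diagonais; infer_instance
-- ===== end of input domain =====

-- B replaces A's four directional while-loops (prepend/append) by computing each diagonal's
-- two extents with min and filling it in one offset pass (objective: simpler decomposition).

-- ===== PORT A =====
-- ord(s) for a one-character string (0 is junk for other strings; Python raises there, outside Pre_)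
def pvOrd (s : String) : Int := match s.toList with | [c] => (c.toNat : Int) | _ => 0
-- chr(i) (valid for 0 ≤ i < 0xd800, which covers every chr the admitted inputs reach)
def pvChr (i : Int) : String := String.ofList [Char.ofNat i.toNat]
-- obtem_pedra: t[l-1][c-97] with Python index semantics; none (IndexError) collapsed to 0, reached only outside Pre_
def pvPedra (t : List (List Int)) (c l : Int) : Int := (PySem.List.pyGet? ((PySem.List.pyGet? t (l-1)).getD []) (c-97)).getD 0

-- the four while-loops of A; fuel only makes them total (inside Pre_ each runs ≤ 9 iterations, Python raises past the board)
def pvLoopUL (t : List (List Int)) : Nat → (String × Int) → List ((String × Int) × Int) → List ((String × Int) × Int)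
  | 0, _, acc => acc
  | fuel+1, pos, acc =>
    if pos.1 ≠ "a" ∧ pos.2 ≠ 1 then
      let pos' : String × Int := (pvChr (pvOrd pos.1 - 1), pos.2 - 1)
      pvLoopUL t fuel pos' ((pos', pvPedra t (pvOrd pos'.1) pos'.2) :: acc)
    else acc

def pvLoopDR (t : List (List Int)) : Nat → (String × Int) → List ((String × Int) × Int) → List ((String × Int) × Int)
  | 0, _, acc => acc
  | fuel+1, pos, acc =>
    if pos.1 ≠ pvChr (96 + (t.length : Int)) ∧ pos.2 ≠ (t.length : Int) then
      let pos' : String × Int := (pvChr (pvOrd pos.1 + 1), pos.2 + 1)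
      pvLoopDR t fuel pos' (acc ++ [(pos', pvPedra t (pvOrd pos'.1) pos'.2)])
    else acc

def pvLoopDL (t : List (List Int)) : Nat → (String × Int) → List ((String × Int) × Int) → List ((String × Int) × Int)
  | 0, _, acc => acc
  | fuel+1, pos, acc =>
    if pos.1 ≠ "a" ∧ pos.2 ≠ (t.length : Int) then
      let pos' : String × Int := (pvChr (pvOrd pos.1 - 1), pos.2 + 1)
      pvLoopDL t fuel pos' ((pos', pvPedra t (pvOrd pos'.1) pos'.2) :: acc)
    else acc

def pvLoopUR (t : List (List Int)) : Nat → (String × Int) → List ((String × Int) × Int) → List ((String × Int) × Int)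
  | 0, _, acc => acc
  | fuel+1, pos, acc =>
    if pos.1 ≠ pvChr (96 + (t.length : Int)) ∧ pos.2 ≠ 1 then
      let pos' : String × Int := (pvChr (pvOrd pos.1 + 1), pos.2 - 1)
      pvLoopUR t fuel pos' (acc ++ [(pos', pvPedra t (pvOrd pos'.1) pos'.2)])
    else acc

def obtem_linhas_diagonais (t : List (List Int)) (p : String × Int) : (List ((String × Int) × Int)) × (List ((String × Int) × Int)) :=
  let base : List ((String × Int) × Int) := [(p, pvPedra t (pvOrd p.1) p.2)]
  (pvLoopDR t 20 p (pvLoopUL t 20 p base), pvLoopUR t 20 p (pvLoopDL t 20 p base))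

-- ===== PORT B =====
def obtem_linhas_diagonais_alt (t : List (List Int)) (p : String × Int) : (List ((String × Int) × Int)) × (List ((String × Int) × Int)) :=
  let c := pvOrd p.1
  let lin := p.2
  let n : Int := t.length
  let up := min (c - 97) (lin - 1)
  let down := min (96 + n - c) (n - lin)
  let diag := (PySem.List.pyRange (-up) (down + 1) 1).map
    (fun k => ((pvChr (c + k), lin + k), pvPedra t (c + k) (lin + k)))
  let a := min (c - 97) (n - lin)
  let b := min (96 + n - c) (lin - 1)
  let antidiag := (PySem.List.pyRange (-a) (b + 1) 1).map
    (fun k => ((pvChr (c + k), lin - k), pvPedra t (c + k) (lin - k)))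
  (diag, antidiag)

-- ===== PRECONDITION & SPEC =====
-- Pre_ is the set of inputs on which A returns normally: a board of side 1..10, a one-letter
-- column inside the board's columns, a row inside the board, and every cell the two diagonals
-- visit present in its (possibly ragged) row.  It excludes inputs where A raises
-- (ValueError/IndexError/TypeError) and the inputs where A only returns thanks to Python's
-- negative-index wraparound (e.g. lin = 0), whose value is an accident of A's implementation.
def Pre_obtem_linhas_diagonais (t : List (List Int)) (p : String × Int) : Prop :=
  1 ≤ t.length ∧ t.length ≤ 10 ∧
  p.1.toList.length = 1 ∧ 97 ≤ pvOrd p.1 ∧ pvOrd p.1 ≤ 96 + (t.length : Int) ∧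
  1 ≤ p.2 ∧ p.2 ≤ (t.length : Int) ∧
  (∀ k ∈ PySem.List.pyRange (-(min (pvOrd p.1 - 97) (p.2 - 1)))
      (min (96 + (t.length : Int) - pvOrd p.1) ((t.length : Int) - p.2) + 1) 1,
    pvOrd p.1 + k - 97 < (((PySem.List.pyGet? t (p.2 + k - 1)).getD []).length : Int)) ∧
  (∀ k ∈ PySem.List.pyRange (-(min (pvOrd p.1 - 97) ((t.length : Int) - p.2)))
      (min (96 + (t.length : Int) - pvOrd p.1) (p.2 - 1) + 1) 1,
    pvOrd p.1 + k - 97 < (((PySem.List.pyGet? t (p.2 - k - 1)).getD []).length : Int))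
instance (t : List (List Int)) (p : String × Int) : Decidable (Pre_obtem_linhas_diagonais t p) := by unfold Pre_obtem_linhas_diagonais; infer_instance
def pvWitness_obtem_linhas_diagonais : List (List Int) × (String × Int) := ([[1, 2], [3, 4]], ("b", 1))

def Spec_obtem_linhas_diagonais (t : List (List Int)) (p : String × Int) (out : (List ((String × Int) × Int)) × (List ((String × Int) × Int))) : Prop := out = obtem_linhas_diagonais_alt t p
instance (t : List (List Int)) (p : String × Int) (out : (List ((String × Int) × Int)) × (List ((String × Int) × Int))) : Decidable (Spec_obtem_linhas_diagonais t p out) := by unfold Spec_obtem_linhas_diagonais; infer_instance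

-- ===== CLAIM (what is proved, stated in full; the proofs are below) =====
def Claim_equal_obtem_linhas_diagonais : Prop := ∀ (t : List (List Int)) (p : String × Int), Dom_obtem_linhas_diagonais t p → Pre_obtem_linhas_diagonais t p → Spec_obtem_linhas_diagonais t p (obtem_linhas_diagonais t p)

-- ===== LEMMAS AND PROOFS =====

theorem pvOrd_pvChr (x : Int) (h1 : 0 ≤ x) (h2 : x ≤ 1000) : pvOrd (pvChr x) = x := by
  unfold pvOrd pvChr
  simp only [String.toList_ofList]
  rw [Char.toNat_ofNat, if_pos (Or.inl (by omega : x.toNat < 55296))]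
  omega

theorem pvChr_inj (x y : Int) (hx1 : 0 ≤ x) (hx2 : x ≤ 1000) (hy1 : 0 ≤ y) (hy2 : y ≤ 1000) :
    pvChr x = pvChr y ↔ x = y := by
  constructor
  · intro h
    have := congrArg pvOrd h
    rwa [pvOrd_pvChr x hx1 hx2, pvOrd_pvChr y hy1 hy2] at this
  · intro h; rw [h]

theorem pvChr_a (x : Int) (hx1 : 0 ≤ x) (hx2 : x ≤ 1000) : pvChr x = "a" ↔ x = 97 := by
  have : ("a" : String) = pvChr 97 := by decide
  rw [this, pvChr_inj x 97 hx1 hx2 (by omega) (by omega)]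

-- element of a diagonal, as a function of the two int coordinates (proof-side abbreviation)
def pvElem (t : List (List Int)) (a b : Int) : (String × Int) × Int := ((pvChr a, b), pvPedra t a b)

theorem pvElem_congr (t : List (List Int)) {a b a' b' : Int} (h1 : a = a') (h2 : b = b') :
    pvElem t a b = pvElem t a' b' := by rw [h1, h2]

theorem map_pyRange_neg_succ {A : Type} (g : Int → A) (m : Int) (h : 1 ≤ m) :
    (PySem.List.pyRange (-m) 0 1).map g
      = (PySem.List.pyRange (-(m-1)) 0 1).map (fun k => g (k-1)) ++ [g (-1)] := by
  rw [PySem.List.pyRange_one, PySem.List.pyRange_one]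
  have h1 : (0 - -m).toNat = (0 - -(m-1)).toNat + 1 := by omega
  rw [h1, List.range_succ]
  simp only [List.map_append, List.map_map, List.map_cons, List.map_nil, Function.comp_def]
  refine congrArg₂ List.append ?_ ?_
  · apply List.map_congr_left; intro k _; congr 1; ring
  · refine congrArg (fun x => [x]) ?_; congr 1; omega

theorem map_pyRange_pos_succ {A : Type} (g : Int → A) (d : Int) (h : 1 ≤ d) :
    (PySem.List.pyRange 1 (d+1) 1).map g
      = g 1 :: (PySem.List.pyRange 1 ((d-1)+1) 1).map (fun k => g (k+1)) := by
  rw [PySem.List.pyRange_one, PySem.List.pyRange_one]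
  have h1 : (d + 1 - 1).toNat = (d - 1 + 1 - 1).toNat + 1 := by omega
  rw [h1, List.range_succ_eq_map]
  simp only [List.map_map, List.map_cons, Function.comp_def, Nat.succ_eq_add_one]
  refine congrArg₂ List.cons (by norm_num) ?_
  apply List.map_congr_left
  intro k _
  congr 1

theorem pvLoopUL_eq (t : List (List Int)) :
    ∀ (fuel : Nat) (c l : Int) (acc : List ((String × Int) × Int)),
      97 ≤ c → c ≤ 106 → 1 ≤ l → (min (c - 97) (l - 1)).toNat ≤ fuel →
      pvLoopUL t fuel (pvChr c, l) acc
        = ((PySem.List.pyRange (-(min (c - 97) (l - 1))) 0 1).map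
            (fun k => pvElem t (c + k) (l + k))) ++ acc := by
  intro fuel
  induction fuel with
  | zero =>
    intro c l acc h1 h2 h3 hf
    have hm : min (c - 97) (l - 1) = 0 := by omega
    rw [hm]
    simp [pvLoopUL, PySem.List.pyRange_one_eq_nil]
  | succ f ih =>
    intro c l acc h1 h2 h3 hf
    by_cases hc : c = 97 ∨ l = 1
    · have hm : min (c - 97) (l - 1) = 0 := by omega
      rw [hm]
      have hcond : ¬(pvChr c ≠ "a" ∧ l ≠ 1) := by
        rcases hc with hc | hc
        · intro hh; exact hh.1 ((pvChr_a c (by omega) (by omega)).2 hc)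
        · intro hh; exact hh.2 hc
      rw [pvLoopUL]
      rw [if_neg (by simpa using hcond)]
      simp [PySem.List.pyRange_one_eq_nil]
    · rw [not_or] at hc
      have hcond : pvChr c ≠ "a" ∧ l ≠ 1 :=
        ⟨fun hh => hc.1 ((pvChr_a c (by omega) (by omega)).1 hh), hc.2⟩
      rw [pvLoopUL]
      rw [if_pos (by simpa using hcond)]
      simp only
      rw [pvOrd_pvChr c (by omega) (by omega),
          pvOrd_pvChr (c - 1) (by omega) (by omega)]
      rw [ih (c - 1) (l - 1) _ (by omega) (by omega) (by omega) (by omega)]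
      rw [map_pyRange_neg_succ _ (min (c - 97) (l - 1)) (by omega)]
      have hmin : min (c - 1 - 97) (l - 1 - 1) = min (c - 97) (l - 1) - 1 := by omega
      rw [hmin, List.append_assoc]
      refine congrArg₂ List.append ?_ ?_
      · apply List.map_congr_left; intro k _
        exact pvElem_congr t (by ring) (by ring)
      · simp only [List.singleton_append]
        refine congrArg₂ List.cons ?_ rfl
        show pvElem t (c - 1) (l - 1) = pvElem t (c + -1) (l + -1)
        exact pvElem_congr t (by ring) (by ring)

theorem pvLoopDR_eq (t : List (List Int)) (n : Int) (hn : n = (t.length : Int)) (hn10 : n ≤ 10) :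
    ∀ (fuel : Nat) (c l : Int) (acc : List ((String × Int) × Int)),
      97 ≤ c → c ≤ 96 + n → l ≤ n → (min (96 + n - c) (n - l)).toNat ≤ fuel →
      pvLoopDR t fuel (pvChr c, l) acc
        = acc ++ ((PySem.List.pyRange 1 (min (96 + n - c) (n - l) + 1) 1).map
            (fun k => pvElem t (c + k) (l + k))) := by
  have hn0 : 0 ≤ n := by rw [hn]; exact Int.natCast_nonneg _
  intro fuel
  induction fuel with
  | zero =>
    intro c l acc h1 h2 h3 hf
    have hm : min (96 + n - c) (n - l) = 0 := by omega
    rw [hm, PySem.List.pyRange_one_eq_nil (by omega)]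
    simp [pvLoopDR]
  | succ f ih =>
    intro c l acc h1 h2 h3 hf
    by_cases hc : c = 96 + n ∨ l = n
    · have hm : min (96 + n - c) (n - l) = 0 := by omega
      rw [hm, PySem.List.pyRange_one_eq_nil (by omega)]
      have hcond : ¬(pvChr c ≠ pvChr (96 + n) ∧ l ≠ n) := by
        rcases hc with hc | hc
        · intro hh; exact hh.1 (by rw [hc])
        · intro hh; exact hh.2 hc
      rw [pvLoopDR, ← hn]
      rw [if_neg (by simpa using hcond)]
      simp
    · rw [not_or] at hc
      have hcond : pvChr c ≠ pvChr (96 + n) ∧ l ≠ n :=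
        ⟨fun hh => hc.1 ((pvChr_inj c (96 + n) (by omega) (by omega) (by omega) (by omega)).1 hh), hc.2⟩
      rw [pvLoopDR, ← hn]
      rw [if_pos (by simpa using hcond)]
      simp only
      rw [pvOrd_pvChr c (by omega) (by omega),
          pvOrd_pvChr (c + 1) (by omega) (by omega)]
      rw [ih (c + 1) (l + 1) _ (by omega) (by omega) (by omega) (by omega)]
      rw [map_pyRange_pos_succ _ (min (96 + n - c) (n - l)) (by omega)]
      have hmin : min (96 + n - (c + 1)) (n - (l + 1)) = min (96 + n - c) (n - l) - 1 := by omega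
      rw [hmin, List.append_assoc]
      refine congrArg (acc ++ ·) ?_
      simp only [List.singleton_append]
      refine congrArg₂ List.cons rfl ?_
      apply List.map_congr_left; intro k _
      exact pvElem_congr t (by ring) (by ring)

theorem pvLoopDL_eq (t : List (List Int)) (n : Int) (hn : n = (t.length : Int)) (_hn10 : n ≤ 10) :
    ∀ (fuel : Nat) (c l : Int) (acc : List ((String × Int) × Int)),
      97 ≤ c → c ≤ 106 → l ≤ n → (min (c - 97) (n - l)).toNat ≤ fuel →
      pvLoopDL t fuel (pvChr c, l) acc
        = ((PySem.List.pyRange (-(min (c - 97) (n - l))) 0 1).map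
            (fun k => pvElem t (c + k) (l - k))) ++ acc := by
  intro fuel
  induction fuel with
  | zero =>
    intro c l acc h1 h2 h3 hf
    have hm : min (c - 97) (n - l) = 0 := by omega
    rw [hm]
    simp [pvLoopDL, PySem.List.pyRange_one_eq_nil]
  | succ f ih =>
    intro c l acc h1 h2 h3 hf
    by_cases hc : c = 97 ∨ l = n
    · have hm : min (c - 97) (n - l) = 0 := by omega
      rw [hm]
      have hcond : ¬(pvChr c ≠ "a" ∧ l ≠ n) := by
        rcases hc with hc | hc
        · intro hh; exact hh.1 ((pvChr_a c (by omega) (by omega)).2 hc)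
        · intro hh; exact hh.2 hc
      rw [pvLoopDL, ← hn]
      rw [if_neg (by simpa using hcond)]
      simp [PySem.List.pyRange_one_eq_nil]
    · rw [not_or] at hc
      have hcond : pvChr c ≠ "a" ∧ l ≠ n :=
        ⟨fun hh => hc.1 ((pvChr_a c (by omega) (by omega)).1 hh), hc.2⟩
      rw [pvLoopDL, ← hn]
      rw [if_pos (by simpa using hcond)]
      simp only
      rw [pvOrd_pvChr c (by omega) (by omega),
          pvOrd_pvChr (c - 1) (by omega) (by omega)]
      rw [ih (c - 1) (l + 1) _ (by omega) (by omega) (by omega) (by omega)]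
      rw [map_pyRange_neg_succ _ (min (c - 97) (n - l)) (by omega)]
      have hmin : min (c - 1 - 97) (n - (l + 1)) = min (c - 97) (n - l) - 1 := by omega
      rw [hmin, List.append_assoc]
      refine congrArg₂ List.append ?_ ?_
      · apply List.map_congr_left; intro k _
        exact pvElem_congr t (by ring) (by ring)
      · simp only [List.singleton_append]
        refine congrArg₂ List.cons ?_ rfl
        show pvElem t (c - 1) (l + 1) = pvElem t (c + -1) (l - -1)
        exact pvElem_congr t (by ring) (by ring)

theorem pvLoopUR_eq (t : List (List Int)) (n : Int) (hn : n = (t.length : Int)) (hn10 : n ≤ 10) :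
    ∀ (fuel : Nat) (c l : Int) (acc : List ((String × Int) × Int)),
      97 ≤ c → c ≤ 96 + n → 1 ≤ l → (min (96 + n - c) (l - 1)).toNat ≤ fuel →
      pvLoopUR t fuel (pvChr c, l) acc
        = acc ++ ((PySem.List.pyRange 1 (min (96 + n - c) (l - 1) + 1) 1).map
            (fun k => pvElem t (c + k) (l - k))) := by
  have hn0 : 0 ≤ n := by rw [hn]; exact Int.natCast_nonneg _
  intro fuel
  induction fuel with
  | zero =>
    intro c l acc h1 h2 h3 hf
    have hm : min (96 + n - c) (l - 1) = 0 := by omega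
    rw [hm, PySem.List.pyRange_one_eq_nil (by omega)]
    simp [pvLoopUR]
  | succ f ih =>
    intro c l acc h1 h2 h3 hf
    by_cases hc : c = 96 + n ∨ l = 1
    · have hm : min (96 + n - c) (l - 1) = 0 := by omega
      rw [hm, PySem.List.pyRange_one_eq_nil (by omega)]
      have hcond : ¬(pvChr c ≠ pvChr (96 + n) ∧ l ≠ 1) := by
        rcases hc with hc | hc
        · intro hh; exact hh.1 (by rw [hc])
        · intro hh; exact hh.2 hc
      rw [pvLoopUR, ← hn]
      rw [if_neg (by simpa using hcond)]
      simp
    · rw [not_or] at hc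
      have hcond : pvChr c ≠ pvChr (96 + n) ∧ l ≠ 1 :=
        ⟨fun hh => hc.1 ((pvChr_inj c (96 + n) (by omega) (by omega) (by omega) (by omega)).1 hh), hc.2⟩
      rw [pvLoopUR, ← hn]
      rw [if_pos (by simpa using hcond)]
      simp only
      rw [pvOrd_pvChr c (by omega) (by omega),
          pvOrd_pvChr (c + 1) (by omega) (by omega)]
      rw [ih (c + 1) (l - 1) _ (by omega) (by omega) (by omega) (by omega)]
      rw [map_pyRange_pos_succ _ (min (96 + n - c) (l - 1)) (by omega)]
      have hmin : min (96 + n - (c + 1)) (l - 1 - 1) = min (96 + n - c) (l - 1) - 1 := by omega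
      rw [hmin, List.append_assoc]
      refine congrArg (acc ++ ·) ?_
      simp only [List.singleton_append]
      refine congrArg₂ List.cons rfl ?_
      apply List.map_congr_left; intro k _
      exact pvElem_congr t (by ring) (by ring)

-- ===== VERDICT (by name: the statement is the Claim_ definition above) =====
theorem obtem_linhas_diagonais_spec : Claim_equal_obtem_linhas_diagonais := by
  unfold Claim_equal_obtem_linhas_diagonais
  intro t p _ hpre
  obtain ⟨hn1, hn10, hlen, hc1, hc2, hl1, hl2, _, _⟩ := hpre
  unfold Spec_obtem_linhas_diagonais
  obtain ⟨ch, hch⟩ := List.length_eq_one_iff.1 hlen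
  have hn10' : (t.length : Int) ≤ 10 := by exact_mod_cast hn10
  have hn1' : (1 : Int) ≤ (t.length : Int) := by exact_mod_cast hn1
  have hp1 : p.1 = pvChr (pvOrd p.1) := by
    have hcv : pvOrd p.1 = (ch.toNat : Int) := by unfold pvOrd; rw [hch]
    rw [hcv]
    unfold pvChr
    rw [Int.toNat_natCast, Char.ofNat_toNat, ← hch, String.ofList_toList]
  have hp : p = (pvChr (pvOrd p.1), p.2) := by rw [← hp1]
  rw [hp]
  unfold obtem_linhas_diagonais obtem_linhas_diagonais_alt
  simp only
  rw [pvOrd_pvChr (pvOrd p.1) (by omega) (by omega)]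
  rw [pvLoopUL_eq t 20 (pvOrd p.1) p.2 _ (by omega) (by omega) (by omega) (by omega)]
  rw [pvLoopDR_eq t (t.length : Int) rfl hn10' 20 (pvOrd p.1) p.2 _ (by omega) (by omega) (by omega) (by omega)]
  rw [pvLoopDL_eq t (t.length : Int) rfl hn10' 20 (pvOrd p.1) p.2 _ (by omega) (by omega) (by omega) (by omega)]
  rw [pvLoopUR_eq t (t.length : Int) rfl hn10' 20 (pvOrd p.1) p.2 _ (by omega) (by omega) (by omega) (by omega)]
  rw [PySem.List.pyRange_one_append (-(min (pvOrd p.1 - 97) (p.2 - 1))) 0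
        (min (96 + (t.length : Int) - pvOrd p.1) ((t.length : Int) - p.2) + 1) (by omega) (by omega)]
  rw [PySem.List.pyRange_one_cons
        (by omega : (0:Int) < min (96 + (t.length : Int) - pvOrd p.1) ((t.length : Int) - p.2) + 1)]
  rw [PySem.List.pyRange_one_append (-(min (pvOrd p.1 - 97) ((t.length : Int) - p.2))) 0
        (min (96 + (t.length : Int) - pvOrd p.1) (p.2 - 1) + 1) (by omega) (by omega)]
  rw [PySem.List.pyRange_one_cons
        (by omega : (0:Int) < min (96 + (t.length : Int) - pvOrd p.1) (p.2 - 1) + 1)]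
  simp [pvElem, List.map_append, List.append_assoc]
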